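-- pv_equiv track=rewrite | github.com/Ricas2410/SearchFind | subscriptions/resume_builder.py | _determine_profession
-- ===== SOURCE A (Python) =====
-- def _determine_profession(user_data):
--     """
--     Determine the user's profession based on experience.
--
--     Args:
--         user_data (dict): Cleaned user profile data
--
--     Returns:
--         str: Determined profession
--     """
--     if not user_data.get('experience'):
--         return "Professional"
--
--     # Get the most recent job title
--     latest_job = user_data['experience'][0]
--     job_title = latest_job.get('title', '')
--
--     # Check for seniority indicators
--     seniority_terms = ['senior', 'lead', 'principal', 'head', 'chief', 'director', 'manager', 'architect']
--     has_seniority = any(term in job_title.lower() for term in seniority_terms)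
--
--     # Determine profession type
--     if 'engineer' in job_title.lower() or 'developer' in job_title.lower():
--         base = "Software Engineer" if 'engineer' in job_title.lower() else "Software Developer"
--         return f"Senior {base}" if has_seniority else f"Experienced {base}"
--
--     elif 'designer' in job_title.lower() or 'ux' in job_title.lower() or 'ui' in job_title.lower():
--         return f"Senior Designer" if has_seniority else "Designer"
--
--     elif 'product' in job_title.lower() or 'project' in job_title.lower():
--         return f"Senior Product Professional" if has_seniority else "Product Professional"
--
--     elif 'data' in job_title.lower() or 'analyst' in job_title.lower():
--         return f"Senior Data Professional" if has_seniority else "Data Professional"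
--
--     elif 'market' in job_title.lower():
--         return f"Senior Marketing Professional" if has_seniority else "Marketing Professional"
--
--     elif has_seniority:
--         return "Senior Professional"
--
--     return "Experienced Professional"
-- ===== SOURCE B (Python) =====
-- _SENIORITY = ('senior', 'lead', 'principal', 'head', 'chief', 'director',
--               'manager', 'architect')
--
-- _RULES = [
--     (('engineer',), "Experienced Software Engineer", "Senior Software Engineer"),
--     (('developer',), "Experienced Software Developer", "Senior Software Developer"),
--     (('designer', 'ux', 'ui'), "Designer", "Senior Designer"),
--     (('product', 'project'), "Product Professional", "Senior Product Professional"),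
--     (('data', 'analyst'), "Data Professional", "Senior Data Professional"),
--     (('market',), "Marketing Professional", "Senior Marketing Professional"),
-- ]
--
-- _ALL_KEYWORDS = _SENIORITY + tuple(k for kws, _, _ in _RULES for k in kws)
--
--
-- def _determine_profession(user_data):
--     if not user_data.get('experience'):
--         return "Professional"
--     title = user_data['experience'][0].get('title', '').lower()
--     # One left-to-right scan of the title: at every suffix record each keyword
--     # (seniority marker or category word) starting there, instead of running a
--     # separate substring search per keyword.
--     found = set()
--     suffix = title
--     while suffix:
--         for kw in _ALL_KEYWORDS:
--             if suffix.startswith(kw):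
--                 found.add(kw)
--         suffix = suffix[1:]
--     senior = any(t in found for t in _SENIORITY)
--     for keywords, normal, senior_label in _RULES:
--         if any(k in found for k in keywords):
--             return senior_label if senior else normal
--     return "Senior Professional" if senior else "Experienced Professional"
-- ===== Notes on version B (the rewrite author's own statement) =====
-- stated objective: alternative
-- what changed: Instead of running one substring search per keyword through an elif chain, B makes a single left-to-right scan over the lowered title, collecting into a set every keyword (seniority or category) that starts at each suffix, then decodes that set against an ordered rule table.
import Mathlib
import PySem

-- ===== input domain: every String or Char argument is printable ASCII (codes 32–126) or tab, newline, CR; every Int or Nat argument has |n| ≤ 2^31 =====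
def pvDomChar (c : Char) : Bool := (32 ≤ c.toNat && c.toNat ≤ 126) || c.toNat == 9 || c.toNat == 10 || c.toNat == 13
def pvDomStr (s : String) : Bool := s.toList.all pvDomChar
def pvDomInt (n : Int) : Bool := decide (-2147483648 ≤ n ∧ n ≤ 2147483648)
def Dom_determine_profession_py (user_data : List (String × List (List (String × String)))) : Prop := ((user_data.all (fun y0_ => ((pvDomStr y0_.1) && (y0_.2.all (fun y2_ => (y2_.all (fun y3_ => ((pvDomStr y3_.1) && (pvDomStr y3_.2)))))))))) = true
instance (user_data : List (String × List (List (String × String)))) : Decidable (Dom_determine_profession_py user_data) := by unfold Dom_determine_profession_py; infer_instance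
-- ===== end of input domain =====

-- B replaces A's per-keyword substring searches and elif chain by ONE scan over
-- the lowered title that collects every keyword starting at each suffix into a
-- set, decoded afterwards against an ordered rule table (objective: alternative).

-- ===== PORT A =====
def determine_profession_py (user_data : List (String × List (List (String × String)))) : String :=
  match (PySem.Dict.mk user_data).get? "experience" with
  | none => "Professional"
  | some exp =>
    if exp.isEmpty then "Professional"
    else
      let latest_job := exp.headD []
      let job_title := (PySem.Dict.mk latest_job).getD "title" ""
      let has_seniority :=
        ["senior","lead","principal","head","chief","director","manager","architect"].any
          (fun term => PySem.Str.isIn term (PySem.Str.lower job_title))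
      if PySem.Str.isIn "engineer" (PySem.Str.lower job_title) ||
         PySem.Str.isIn "developer" (PySem.Str.lower job_title) then
        let base := if PySem.Str.isIn "engineer" (PySem.Str.lower job_title)
                    then "Software Engineer" else "Software Developer"
        if has_seniority then "Senior " ++ base else "Experienced " ++ base
      else if PySem.Str.isIn "designer" (PySem.Str.lower job_title) ||
              PySem.Str.isIn "ux" (PySem.Str.lower job_title) ||
              PySem.Str.isIn "ui" (PySem.Str.lower job_title) then
        if has_seniority then "Senior Designer" else "Designer"
      else if PySem.Str.isIn "product" (PySem.Str.lower job_title) ||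
              PySem.Str.isIn "project" (PySem.Str.lower job_title) then
        if has_seniority then "Senior Product Professional" else "Product Professional"
      else if PySem.Str.isIn "data" (PySem.Str.lower job_title) ||
              PySem.Str.isIn "analyst" (PySem.Str.lower job_title) then
        if has_seniority then "Senior Data Professional" else "Data Professional"
      else if PySem.Str.isIn "market" (PySem.Str.lower job_title) then
        if has_seniority then "Senior Marketing Professional" else "Marketing Professional"
      else if has_seniority then "Senior Professional"
      else "Experienced Professional"

-- ===== PORT B =====
def pvSeniority : List String :=
  ["senior","lead","principal","head","chief","director","manager","architect"]

def pvRules : List (List String × String × String) :=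
  [ (["engineer"], "Experienced Software Engineer", "Senior Software Engineer"),
    (["developer"], "Experienced Software Developer", "Senior Software Developer"),
    (["designer", "ux", "ui"], "Designer", "Senior Designer"),
    (["product", "project"], "Product Professional", "Senior Product Professional"),
    (["data", "analyst"], "Data Professional", "Senior Data Professional"),
    (["market"], "Marketing Professional", "Senior Marketing Professional") ]

def pvAllKeywords : List String := pvSeniority ++ (pvRules.flatMap (fun r => r.1))

-- the while-loop over the successive suffixes of the title: each step records
-- every keyword starting at the current suffix ('suffix.startswith(kw)' is
-- exactly a prefix test on the suffix's character list), then drops one char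
def pvScan : List Char → PySem.Set String → PySem.Set String
  | [], found => found
  | c :: rest, found =>
      pvScan rest
        (pvAllKeywords.foldl
          (fun f kw => if PySem.Chars.startswith (c :: rest) kw.toList then PySem.Set.add f kw else f)
          found)

def pvDecode (found : PySem.Set String) (senior : Bool) : List (List String × String × String) → String
  | [] => if senior then "Senior Professional" else "Experienced Professional"
  | (keywords, normal, senior_label) :: rest =>
    if keywords.any (fun k => PySem.Set.contains found k) then
      (if senior then senior_label else normal)
    else pvDecode found senior rest

def determine_profession_py_alt (user_data : List (String × List (List (String × String)))) : String :=
  match (PySem.Dict.mk user_data).get? "experience" with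
  | none => "Professional"
  | some exp =>
    if exp.isEmpty then "Professional"
    else
      let title := PySem.Str.lower ((PySem.Dict.mk (exp.headD [])).getD "title" "")
      let found := pvScan title.toList PySem.Set.empty
      let senior := pvSeniority.any (fun t => PySem.Set.contains found t)
      pvDecode found senior pvRules

-- ===== PRECONDITION & SPEC =====
def Spec_determine_profession_py (user_data : List (String × List (List (String × String)))) (out : String) : Prop := out = determine_profession_py_alt user_data
instance (user_data : List (String × List (List (String × String)))) (out : String) : Decidable (Spec_determine_profession_py user_data out) := by unfold Spec_determine_profession_py; infer_instance

-- ===== CLAIM (what is proved, stated in full; the proofs are below) =====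
def Claim_equal_determine_profession_py : Prop := ∀ (user_data : List (String × List (List (String × String)))), Dom_determine_profession_py user_data → Spec_determine_profession_py user_data (determine_profession_py user_data)

-- ===== LEMMAS AND PROOFS =====

-- membership in the inner for-loop's accumulator
theorem pv_mem_step (l : List String) (s : PySem.Set String) (cs : List Char) (y : String) :
    y ∈ l.foldl (fun f kw => if PySem.Chars.startswith cs kw.toList then PySem.Set.add f kw else f) s
      ↔ y ∈ s ∨ (y ∈ l ∧ PySem.Chars.startswith cs y.toList = true) := by
  induction l generalizing s with
  | nil => simp
  | cons a t ih =>
    simp only [List.foldl_cons, ih, List.mem_cons]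
    by_cases h : PySem.Chars.startswith cs a.toList = true
    · rw [if_pos h]
      simp only [PySem.Set.mem_add]
      constructor
      · rintro ((hs | rfl) | ht)
        · exact Or.inl hs
        · exact Or.inr ⟨Or.inl rfl, h⟩
        · exact Or.inr ⟨Or.inr ht.1, ht.2⟩
      · rintro (hs | ⟨(rfl | ht), hp⟩)
        · exact Or.inl (Or.inl hs)
        · exact Or.inl (Or.inr rfl)
        · exact Or.inr ⟨ht, hp⟩
    · rw [if_neg h]
      constructor
      · rintro (hs | ht)
        · exact Or.inl hs
        · exact Or.inr ⟨Or.inr ht.1, ht.2⟩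
      · rintro (hs | ⟨(rfl | ht), hp⟩)
        · exact Or.inl hs
        · exact absurd hp h
        · exact Or.inr ⟨ht, hp⟩

-- membership in the scan's accumulator: a keyword is found iff it is a prefix of some suffix
theorem pv_mem_scan (cs : List Char) (s : PySem.Set String) (y : String) (hy : y.toList ≠ []) :
    y ∈ pvScan cs s ↔ y ∈ s ∨ (y ∈ pvAllKeywords ∧ ∃ j, y.toList <+: cs.drop j) := by
  induction cs generalizing s with
  | nil =>
    simp only [pvScan, List.drop_nil]
    constructor
    · exact Or.inl
    · rintro (hs | ⟨_, _, hp⟩)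
      · exact hs
      · exact absurd (List.prefix_nil.mp hp) hy
  | cons c rest ih =>
    simp only [pvScan, ih, pv_mem_step]
    constructor
    · rintro ((hs | ⟨hk, hp⟩) | ⟨hk, j, hp⟩)
      · exact Or.inl hs
      · exact Or.inr ⟨hk, 0, by simpa [PySem.Chars.startswith_iff] using hp⟩
      · exact Or.inr ⟨hk, j + 1, by simpa using hp⟩
    · rintro (hs | ⟨hk, j, hp⟩)
      · exact Or.inl (Or.inl hs)
      · cases j with
        | zero => exact Or.inl (Or.inr ⟨hk, (PySem.Chars.startswith_iff _ _).mpr (by simpa using hp)⟩)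
        | succ j => exact Or.inr ⟨hk, j, by simpa using hp⟩

-- the found-set test equals Python's 'kw in title' for every keyword of the table
theorem pv_contains_scan (cs : List Char) (kw : String)
    (h1 : kw ∈ pvAllKeywords) (h2 : kw.toList ≠ []) :
    PySem.Set.contains (pvScan cs PySem.Set.empty) kw = PySem.Chars.isIn kw.toList cs := by
  have hmem : kw ∈ pvScan cs PySem.Set.empty ↔ PySem.Chars.isIn kw.toList cs = true := by
    rw [pv_mem_scan cs _ kw h2, ← PySem.Chars.exists_prefix_drop_iff_isIn]
    constructor
    · rintro (hs | ⟨_, hp⟩)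
      · exact absurd hs (by simp [PySem.Set.empty])
      · exact hp
    · intro hp
      exact Or.inr ⟨h1, hp⟩
  show List.contains (pvScan cs PySem.Set.empty) kw = PySem.Chars.isIn kw.toList cs
  by_cases h : PySem.Chars.isIn kw.toList cs = true
  · rw [h]
    exact List.contains_iff_mem.mpr (hmem.mpr h)
  · rw [Bool.not_eq_true] at h
    rw [h, Bool.eq_false_iff]
    intro hc
    exact absurd (hmem.mp (List.contains_iff_mem.mp hc)) (by simp [h])

-- ===== VERDICT (by name: the statement is the Claim_ definition above) =====
theorem determine_profession_py_spec : Claim_equal_determine_profession_py := by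
  intro u _
  unfold Spec_determine_profession_py determine_profession_py determine_profession_py_alt
  cases h : (PySem.Dict.mk u).get? "experience" with
  | none => rfl
  | some exp =>
    by_cases he : exp.isEmpty
    · simp [he]
    · simp only [he, if_false, Bool.false_eq_true]
      generalize PySem.Str.lower ((PySem.Dict.mk (exp.headD [])).getD "title" "") = t
      have hc : ∀ kw : String, kw ∈ pvAllKeywords → kw.toList ≠ [] →
          PySem.Set.contains (pvScan t.toList PySem.Set.empty) kw = PySem.Str.isIn kw t := by
        intro kw h1 h2
        rw [pv_contains_scan t.toList kw h1 h2]
        simp [PySem.Str.isIn]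
      have e1 := hc "senior" (by decide) (by decide)
      have e2 := hc "lead" (by decide) (by decide)
      have e3 := hc "principal" (by decide) (by decide)
      have e4 := hc "head" (by decide) (by decide)
      have e5 := hc "chief" (by decide) (by decide)
      have e6 := hc "director" (by decide) (by decide)
      have e7 := hc "manager" (by decide) (by decide)
      have e8 := hc "architect" (by decide) (by decide)
      have e9 := hc "engineer" (by decide) (by decide)
      have e10 := hc "developer" (by decide) (by decide)
      have e11 := hc "designer" (by decide) (by decide)
      have e12 := hc "ux" (by decide) (by decide)
      have e13 := hc "ui" (by decide) (by decide)
      have e14 := hc "product" (by decide) (by decide)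
      have e15 := hc "project" (by decide) (by decide)
      have e16 := hc "data" (by decide) (by decide)
      have e17 := hc "analyst" (by decide) (by decide)
      have e18 := hc "market" (by decide) (by decide)
      simp only [pvDecode, pvRules, pvSeniority, List.any_cons, List.any_nil, Bool.or_false,
        e1, e2, e3, e4, e5, e6, e7, e8, e9, e10, e11, e12, e13, e14, e15, e16, e17, e18]
      generalize PySem.Str.isIn "senior" t = s1
      generalize PySem.Str.isIn "lead" t = s2
      generalize PySem.Str.isIn "principal" t = s3
      generalize PySem.Str.isIn "head" t = s4
      generalize PySem.Str.isIn "chief" t = s5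
      generalize PySem.Str.isIn "director" t = s6
      generalize PySem.Str.isIn "manager" t = s7
      generalize PySem.Str.isIn "architect" t = s8
      generalize PySem.Str.isIn "engineer" t = b1
      generalize PySem.Str.isIn "developer" t = b2
      generalize PySem.Str.isIn "designer" t = b3
      generalize PySem.Str.isIn "ux" t = b4
      generalize PySem.Str.isIn "ui" t = b5
      generalize PySem.Str.isIn "product" t = b6
      generalize PySem.Str.isIn "project" t = b7
      generalize PySem.Str.isIn "data" t = b8
      generalize PySem.Str.isIn "analyst" t = b9
      generalize PySem.Str.isIn "market" t = b10
      generalize (s1 || (s2 || (s3 || (s4 || (s5 || (s6 || (s7 || s8))))))) = sen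
      revert sen b1 b2 b3 b4 b5 b6 b7 b8 b9 b10
      decide
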